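-- pv_equiv track=rewrite | github.com/pypi-data/pypi-mirror-403 | packages/joplin-mcp/joplin_mcp-0.5.0-py3-none-any.whl/joplin_mcp/notebook_utils.py | _find_notebook_suggestions
-- ===== SOURCE A (Python) =====
-- from typing import Any, Callable, Dict, List, Optional
--
-- def _compute_notebook_path(
--     notebook_id: Optional[str],
--     notebooks_map: Dict[str, Dict[str, Optional[str]]],
--     sep: str = " / ",
-- ) -> Optional[str]:
--     """Compute full notebook path from root to the specified notebook.
--
--     Returns a string like "Parent / Child / Notebook" or None if unavailable.
--     """
--     if not notebook_id:
--         return None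
--
--     parts: List[str] = []
--     seen: set[str] = set()
--     curr = notebook_id
--     while curr and curr not in seen:
--         seen.add(curr)
--         info = notebooks_map.get(curr)
--         if not info:
--             break
--         title = (info.get("title") or "Untitled").strip()
--         parts.append(title)
--         curr = info.get("parent_id")
--
--     if not parts:
--         return None
--     return sep.join(reversed(parts))
--
-- def _find_notebook_suggestions(
--     search_term: str,
--     notebooks_map: Dict[str, Dict[str, Optional[str]]],
--     limit: int = 5,
-- ) -> List[str]:
--     """Find notebook paths containing search_term (case-insensitive).
--
--     Args:
--         search_term: Term to search for in notebook titles
--         notebooks_map: Map of notebook_id -> {title, parent_id}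
--         limit: Maximum number of suggestions to return
--
--     Returns:
--         List of full notebook paths containing the search term
--     """
--     search_lower = search_term.lower()
--     matching_paths = []
--
--     for nb_id, info in notebooks_map.items():
--         title = info.get("title", "")
--         if search_lower in title.lower():
--             full_path = _compute_notebook_path(nb_id, notebooks_map, sep="/")
--             if full_path:
--                 # Sort key: exact match first, then by path length (shorter = more relevant)
--                 is_exact = title.lower() == search_lower
--                 matching_paths.append((not is_exact, len(full_path), full_path))
--
--     # Sort by (not_exact, length) and return just the paths
--     matching_paths.sort()
--     return [path for _, _, path in matching_paths[:limit]]
-- ===== SOURCE B (Python) =====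
-- def _memo_path(nb_id, notebooks_map, memo, sep="/"):
--     """Full path of nb_id; caches every acyclic node's path in memo (id -> path)."""
--     chain = []              # (id, title) pairs from nb_id upward, none of them memoized yet
--     chain_ids = set()
--     curr = nb_id
--     base = None
--     cyclic = False
--     while curr:
--         if curr in chain_ids:
--             cyclic = True
--             break
--         if curr in memo:
--             base = memo[curr]
--             break
--         info = notebooks_map.get(curr)
--         if not info:
--             break
--         chain.append((curr, (info.get("title") or "Untitled").strip()))
--         chain_ids.add(curr)
--         curr = info.get("parent_id")
--     # extend the cached ancestor path downwards, caching each suffix on the way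
--     path = base
--     for cid, title in reversed(chain):
--         path = title if path is None else path + sep + title
--         if not cyclic:
--             memo[cid] = path
--     return path
--
-- def _find_notebook_suggestions(search_term, notebooks_map, limit=5):
--     search_lower = search_term.lower()
--     memo = {}
--     matching_paths = []
--     for nb_id, info in notebooks_map.items():
--         title = info.get("title", "")
--         if search_lower in title.lower():
--             full_path = _memo_path(nb_id, notebooks_map, memo)
--             if full_path:
--                 is_exact = title.lower() == search_lower
--                 matching_paths.append((not is_exact, len(full_path), full_path))
--     matching_paths.sort()
--     return [path for _, _, path in matching_paths[:limit]]
-- ===== Notes on version B (the rewrite author's own statement) =====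
-- stated objective: alternative
-- what changed: B replaces A's per-notebook upward path walk by a shared memo dict (notebook id -> full path): each query walks only the not-yet-cached parent chain, stops at any cached ancestor, and back-fills the cache for every node of the chain (skipping caching on cycles), so shared ancestry is resolved once instead of re-walked per matching notebook.
import Mathlib
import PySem

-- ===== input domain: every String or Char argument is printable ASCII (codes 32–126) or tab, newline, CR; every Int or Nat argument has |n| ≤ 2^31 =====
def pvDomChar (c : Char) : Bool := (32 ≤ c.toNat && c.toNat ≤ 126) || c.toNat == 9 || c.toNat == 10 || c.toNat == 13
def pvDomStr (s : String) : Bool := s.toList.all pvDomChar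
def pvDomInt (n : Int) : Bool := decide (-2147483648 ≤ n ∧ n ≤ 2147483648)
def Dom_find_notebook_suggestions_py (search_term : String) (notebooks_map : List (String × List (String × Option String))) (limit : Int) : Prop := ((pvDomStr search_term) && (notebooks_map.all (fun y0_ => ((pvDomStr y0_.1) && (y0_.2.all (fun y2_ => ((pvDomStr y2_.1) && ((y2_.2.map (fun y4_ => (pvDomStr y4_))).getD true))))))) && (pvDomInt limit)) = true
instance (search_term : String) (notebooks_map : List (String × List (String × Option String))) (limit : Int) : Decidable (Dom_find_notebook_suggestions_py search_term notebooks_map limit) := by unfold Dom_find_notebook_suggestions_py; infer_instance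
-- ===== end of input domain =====

-- ===== PORT A =====
-- B replaces A's per-notebook upward path walk by a shared memo table (id -> full
-- path): each query walks only the not-yet-cached parent chain and back-fills the
-- cache for every node on it (skipping the cache on cycles); objective: alternative.

-- tiny accessors both Python versions spell out identically
def pvRawTitle (info : List (String × Option String)) : String :=
  ((PySem.Dict.ofList info).getD "title" (some "")).getD ""

def pvInfoTitle (info : List (String × Option String)) : String :=
  let t0 := ((PySem.Dict.ofList info).get? "title").join.getD ""
  PySem.Str.strip (if t0 = "" then "Untitled" else t0)

def pvInfoParent (info : List (String × Option String)) : Option String :=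
  ((PySem.Dict.ofList info).get? "parent_id").join

-- A's while-loop in _compute_notebook_path, collecting `parts` in visit order
def pvWalkA (d : PySem.Dict String (List (String × Option String))) :
    Nat → Option String → PySem.Set String → List String
  | 0, _, _ => []
  | fuel+1, curr, seen =>
    match curr with
    | none => []
    | some c =>
      if c = "" then []
      else if seen.contains c then []
      else
        match d.get? c with
        | none => []
        | some info =>
          if info = [] then []
          else pvInfoTitle info :: pvWalkA d fuel (pvInfoParent info) (PySem.Set.add seen c)

def pvComputePathA (nb : String) (d : PySem.Dict String (List (String × Option String))) :
    Option String :=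
  if nb = "" then none
  else
    let parts := pvWalkA d (d.size + 2) (some nb) (PySem.Set.ofList [])
    if parts = [] then none else some (PySem.Str.join "/" parts.reverse)

def find_notebook_suggestions_py (search_term : String) (notebooks_map : List (String × List (String × Option String))) (limit : Int) : List String :=
  let d := PySem.Dict.ofList notebooks_map
  let search_lower := PySem.Str.lower search_term
  let matching := d.items.foldl (fun (acc : List (Bool × Int × String)) p =>
      let title := pvRawTitle p.2
      if PySem.Str.isIn search_lower (PySem.Str.lower title) then
        match pvComputePathA p.1 d with
        | some fp =>
          if fp ≠ "" then
            acc ++ [(!(PySem.Str.lower title == search_lower), PySem.Str.len fp, fp)]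
          else acc
        | none => acc
      else acc) []
  let sortedM := PySem.List.sorted matching (fun t => toLex (t.1, toLex (t.2.1, t.2.2))) false
  (PySem.List.slice sortedM none (some limit)).map (fun t => t.2.2)

-- ===== PORT B =====
-- B's while-loop in _memo_path: walk upward until a cycle, a cached id, or a root,
-- collecting the not-yet-cached (id, title) chain; returns (chain, base, cyclic)
def pvChainWalk (d : PySem.Dict String (List (String × Option String)))
    (memo : PySem.Dict String String) :
    Nat → Option String → List (String × String) → PySem.Set String →
      List (String × String) × Option String × Bool
  | 0, _, chain, _ => (chain, none, false)
  | fuel+1, curr, chain, chainIds =>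
    match curr with
    | none => (chain, none, false)
    | some c =>
      if c = "" then (chain, none, false)
      else if chainIds.contains c then (chain, none, true)
      else
        match memo.get? c with
        | some b => (chain, some b, false)
        | none =>
          match d.get? c with
          | none => (chain, none, false)
          | some info =>
            if info = [] then (chain, none, false)
            else pvChainWalk d memo fuel (pvInfoParent info)
                   (chain ++ [(c, pvInfoTitle info)]) (PySem.Set.add chainIds c)

-- B's _memo_path: extend the cached ancestor path downwards over the reversed chain,
-- caching each suffix path on the way (unless the walk ended in a cycle)
def pvMemoPath (nb : String) (d : PySem.Dict String (List (String × Option String)))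
    (memo : PySem.Dict String String) : Option String × PySem.Dict String String :=
  let r := pvChainWalk d memo (d.size + 2) (some nb) [] (PySem.Set.ofList [])
  r.1.reverse.foldl
    (fun (st : Option String × PySem.Dict String String) (ct : String × String) =>
      let p := match st.1 with | none => ct.2 | some s => s ++ "/" ++ ct.2
      (some p, if r.2.2 then st.2 else st.2.insert ct.1 p))
    (r.2.1, memo)

def find_notebook_suggestions_py_alt (search_term : String) (notebooks_map : List (String × List (String × Option String))) (limit : Int) : List String :=
  let d := PySem.Dict.ofList notebooks_map
  let search_lower := PySem.Str.lower search_term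
  let res := d.items.foldl (fun (st : List (Bool × Int × String) × PySem.Dict String String) p =>
      let title := pvRawTitle p.2
      if PySem.Str.isIn search_lower (PySem.Str.lower title) then
        let r := pvMemoPath p.1 d st.2
        match r.1 with
        | some fp =>
          if fp ≠ "" then
            (st.1 ++ [(!(PySem.Str.lower title == search_lower), PySem.Str.len fp, fp)], r.2)
          else (st.1, r.2)
        | none => (st.1, r.2)
      else st) ([], PySem.Dict.empty)
  let sortedM := PySem.List.sorted res.1 (fun t => toLex (t.1, toLex (t.2.1, t.2.2))) false
  (PySem.List.slice sortedM none (some limit)).map (fun t => t.2.2)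

-- ===== PRECONDITION & SPEC =====
-- Pre_ excludes exactly the inputs on which the Python A raises AttributeError:
-- some notebook's effective info dict stores None under "title" (A calls .lower() on it).
def Pre_find_notebook_suggestions_py (search_term : String) (notebooks_map : List (String × List (String × Option String))) (limit : Int) : Prop :=
  ∀ p ∈ (PySem.Dict.ofList notebooks_map).items,
    (PySem.Dict.ofList p.2).get? "title" ≠ some none
instance (search_term : String) (notebooks_map : List (String × List (String × Option String))) (limit : Int) : Decidable (Pre_find_notebook_suggestions_py search_term notebooks_map limit) := by unfold Pre_find_notebook_suggestions_py; infer_instance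

def pvWitness_find_notebook_suggestions_py : String × (List (String × List (String × Option String))) × Int :=
  ("a", [("1", [("title", some "ab"), ("parent_id", none)])], 5)

def Spec_find_notebook_suggestions_py (search_term : String) (notebooks_map : List (String × List (String × Option String))) (limit : Int) (out : List String) : Prop := out = find_notebook_suggestions_py_alt search_term notebooks_map limit
instance (search_term : String) (notebooks_map : List (String × List (String × Option String))) (limit : Int) (out : List String) : Decidable (Spec_find_notebook_suggestions_py search_term notebooks_map limit out) := by unfold Spec_find_notebook_suggestions_py; infer_instance

-- ===== CLAIM (what is proved, stated in full; the proofs are below) =====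
def Claim_equal_find_notebook_suggestions_py : Prop := ∀ (search_term : String) (notebooks_map : List (String × List (String × Option String))) (limit : Int), Dom_find_notebook_suggestions_py search_term notebooks_map limit → Pre_find_notebook_suggestions_py search_term notebooks_map limit → Spec_find_notebook_suggestions_py search_term notebooks_map limit (find_notebook_suggestions_py search_term notebooks_map limit)

-- ===== LEMMAS AND PROOFS =====

theorem pvWitness_ok :
    Dom_find_notebook_suggestions_py pvWitness_find_notebook_suggestions_py.1 pvWitness_find_notebook_suggestions_py.2.1 pvWitness_find_notebook_suggestions_py.2.2 ∧
    Pre_find_notebook_suggestions_py pvWitness_find_notebook_suggestions_py.1 pvWitness_find_notebook_suggestions_py.2.1 pvWitness_find_notebook_suggestions_py.2.2 := by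
  decide

-- one-step lookup: `some info` exactly when A's walk can take a step at id c
def pvLook (d : PySem.Dict String (List (String × Option String))) (c : String) :
    Option (List (String × Option String)) :=
  if c = "" then none
  else match d.get? c with
    | none => none
    | some info => if info = [] then none else some info

theorem pvLook_eq_some_iff {d : PySem.Dict String (List (String × Option String))}
    {c : String} {info : List (String × Option String)} :
    pvLook d c = some info ↔ c ≠ "" ∧ d.get? c = some info ∧ info ≠ [] := by
  unfold pvLook
  by_cases h1 : c = ""
  · simp [h1]
  · rw [if_neg h1]
    cases hg : d.get? c with
    | none => simp [h1]
    | some i =>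
      by_cases h2 : i = []
      · subst h2
        simp only [if_pos rfl]
        constructor
        · rintro ⟨⟩
        · rintro ⟨-, h, hne⟩
          cases h
          exact absurd rfl hne
      · simp only [if_neg h2]
        constructor
        · rintro h
          cases h
          exact ⟨h1, rfl, h2⟩
        · rintro ⟨-, h, -⟩
          cases h
          rfl

theorem pvLook_eq_none_iff {d : PySem.Dict String (List (String × Option String))}
    {c : String} :
    pvLook d c = none ↔ c = "" ∨ d.get? c = none ∨ d.get? c = some [] := by
  unfold pvLook
  by_cases h1 : c = ""
  · simp [h1]
  · rw [if_neg h1]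
    cases hg : d.get? c with
    | none => simp [h1]
    | some i =>
      by_cases h2 : i = []
      · subst h2; simp [h1]
      · simp [h1, h2]

theorem pvMemKeys_of_get? {d : PySem.Dict String (List (String × Option String))}
    {c : String} {info : List (String × Option String)}
    (h : d.get? c = some info) : c ∈ d.keys :=
  PySem.Dict.mem_keys_of_mem_items d (PySem.Dict.mem_items_of_get?_eq_some d h)

theorem pvLen_le_size {d : PySem.Dict String (List (String × Option String))}
    {l : List String} (hnd : l.Nodup) (hsub : ∀ c ∈ l, c ∈ d.keys) :
    l.length ≤ d.size := by
  have h3 := (List.subperm_of_subset hnd (fun c hc => hsub c hc)).length_le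
  simpa [PySem.Dict.keys, PySem.Dict.size] using h3

def pvTitleOf (d : PySem.Dict String (List (String × Option String))) (c : String) : String :=
  match pvLook d c with | some info => pvInfoTitle info | none => ""

-- the ids visited by an upward walk that terminates at a root (never by a seen-hit)
inductive pvRoot (d : PySem.Dict String (List (String × Option String))) :
    Option String → List String → Prop
  | stopNone : pvRoot d none []
  | stopInvalid (c : String) (h : pvLook d c = none) : pvRoot d (some c) []
  | step (c : String) (info : List (String × Option String)) (ids : List String)
      (h : pvLook d c = some info) (hr : pvRoot d (pvInfoParent info) ids)
      (hn : c ∉ ids) : pvRoot d (some c) (c :: ids)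

theorem pvRoot_det {d : PySem.Dict String (List (String × Option String))}
    {u : Option String} {L L' : List String}
    (h : pvRoot d u L) (h' : pvRoot d u L') : L = L' := by
  induction h generalizing L' with
  | stopNone => cases h' with | stopNone => rfl
  | stopInvalid c hc =>
    cases h' with
    | stopInvalid _ _ => rfl
    | step _ info _ h2 _ _ => rw [hc] at h2; cases h2
  | step c info ids h1 hr hn ih =>
    cases h' with
    | stopInvalid _ hc => rw [hc] at h1; cases h1
    | step _ info' ids' h2 hr2 hn2 =>
      rw [h1] at h2
      cases h2
      exact congrArg (c :: ·) (ih hr2)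

theorem pvRoot_nodup {d : PySem.Dict String (List (String × Option String))}
    {u : Option String} {L : List String} (h : pvRoot d u L) : L.Nodup := by
  induction h with
  | stopNone => exact List.nodup_nil
  | stopInvalid _ _ => exact List.nodup_nil
  | step c info ids _ _ hn ih => exact List.nodup_cons.mpr ⟨hn, ih⟩

theorem pvRoot_mem_keys {d : PySem.Dict String (List (String × Option String))}
    {u : Option String} {L : List String} (h : pvRoot d u L) :
    ∀ c ∈ L, c ∈ d.keys := by
  induction h with
  | stopNone => intro c hc; cases hc
  | stopInvalid _ _ => intro c hc; cases hc
  | step c info ids hl _ _ ih =>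
    intro x hx
    rcases List.mem_cons.mp hx with rfl | hx
    · exact pvMemKeys_of_get? (pvLook_eq_some_iff.mp hl).2.1
    · exact ih x hx

theorem pvRoot_suffix {d : PySem.Dict String (List (String × Option String))}
    {u : Option String} {L : List String} (h : pvRoot d u L) :
    ∀ pre c suf, L = pre ++ c :: suf → pvRoot d (some c) (c :: suf) := by
  induction h with
  | stopNone => intro pre c suf he; cases pre <;> cases he
  | stopInvalid _ _ => intro pre c suf he; cases pre <;> cases he
  | step c0 info ids h hr hn ih =>
    intro pre c suf he
    cases pre with
    | nil =>
      simp only [List.nil_append, List.cons.injEq] at he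
      obtain ⟨rfl, rfl⟩ := he
      exact pvRoot.step c0 info ids h hr hn
    | cons p pre' =>
      simp only [List.cons_append, List.cons.injEq] at he
      exact ih pre' c suf he.2

-- A's walk along a rooted id list, with any disjoint `seen` set and enough fuel
theorem pvWalkA_of_root {d : PySem.Dict String (List (String × Option String))}
    {u : Option String} {W : List String} (h : pvRoot d u W) :
    ∀ (fuel : Nat) (seen : PySem.Set String), (∀ x ∈ W, x ∉ seen) →
      W.length < fuel → pvWalkA d fuel u seen = W.map (pvTitleOf d) := by
  induction h with
  | stopNone =>
    intro fuel seen _ hf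
    cases fuel with
    | zero => omega
    | succ n => simp [pvWalkA]
  | stopInvalid c hc =>
    intro fuel seen _ hf
    cases fuel with
    | zero => omega
    | succ n =>
      rcases pvLook_eq_none_iff.mp hc with h1 | h1 | h1
      · simp [pvWalkA, h1]
      · by_cases hs : c ∈ seen <;> simp [pvWalkA, hs, h1]
      · by_cases hs : c ∈ seen <;> by_cases he : c = "" <;>
          simp [pvWalkA, hs, h1, he]
  | step c info ids hl hr hn ih =>
    intro fuel seen hdisj hf
    cases fuel with
    | zero => omega
    | succ n =>
      obtain ⟨h1, hg, h2⟩ := pvLook_eq_some_iff.mp hl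
      have hsc : c ∉ seen := hdisj c (List.mem_cons_self)
      have hT : pvTitleOf d c = pvInfoTitle info := by
        unfold pvTitleOf
        rw [hl]
      have hrec := ih n (PySem.Set.add seen c) (by
        intro x hx hm
        rcases (PySem.Set.mem_add seen c x).mp hm with hm' | hm'
        · exact hdisj x (List.mem_cons_of_mem _ hx) hm'
        · exact hn (hm' ▸ hx)) (by simpa using Nat.lt_of_succ_lt_succ hf)
      rw [PySem.Set.add_of_not_mem hsc] at hrec
      simp [pvWalkA, h1, hsc, hg, h2, hrec, hT]

-- parent-link structure of a chain of ids ending at e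
def pvLinks (d : PySem.Dict String (List (String × Option String))) :
    List String → Option String → Prop
  | [], _ => True
  | c :: rest, e =>
    (∃ info, pvLook d c = some info ∧
      pvInfoParent info = (match rest with | [] => e | c' :: _ => some c')) ∧
    pvLinks d rest e

theorem pvLinks_suffix {d : PySem.Dict String (List (String × Option String))}
    {e : Option String} : ∀ {l1 l2 : List String},
    pvLinks d (l1 ++ l2) e → pvLinks d l2 e := by
  intro l1
  induction l1 with
  | nil => intro l2 h; exact h
  | cons c t ih =>
    intro l2 h
    exact ih h.2

theorem pvLinks_snoc {d : PySem.Dict String (List (String × Option String))}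
    {c : String} {info : List (String × Option String)}
    (hc : pvLook d c = some info) :
    ∀ {cs : List String}, pvLinks d cs (some c) →
      pvLinks d (cs ++ [c]) (pvInfoParent info) := by
  intro cs
  induction cs with
  | nil => intro _; exact ⟨⟨info, hc, rfl⟩, trivial⟩
  | cons c0 rest ih =>
    intro h
    obtain ⟨⟨info0, h0, hp0⟩, hrest⟩ := h
    refine ⟨⟨info0, h0, ?_⟩, ih hrest⟩
    cases rest <;> simpa using hp0

theorem pvLinks_mem_keys {d : PySem.Dict String (List (String × Option String))}
    {e : Option String} : ∀ {cs : List String}, pvLinks d cs e →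
      ∀ c ∈ cs, c ∈ d.keys := by
  intro cs
  induction cs with
  | nil => intro _ c hc; cases hc
  | cons c0 rest ih =>
    intro h x hx
    rcases List.mem_cons.mp hx with rfl | hx
    · obtain ⟨⟨info, hl, _⟩, _⟩ := h
      exact pvMemKeys_of_get? (pvLook_eq_some_iff.mp hl).2.1
    · exact ih h.2 x hx

-- a rooted walk list always starts with its own id
theorem pvRoot_cons_of_some {d : PySem.Dict String (List (String × Option String))}
    {c : String} {info : List (String × Option String)} {L : List String}
    (h : pvRoot d (some c) L) (hc : pvLook d c = some info) :
    ∃ ids, L = c :: ids ∧ pvRoot d (pvInfoParent info) ids ∧ c ∉ ids := by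
  cases h with
  | stopInvalid _ h0 => rw [h0] at hc; cases hc
  | step _ info' ids h0 hr hn =>
    rw [h0] at hc
    cases hc
    exact ⟨ids, rfl, hr, hn⟩

theorem pvRoot_mem_suffix {d : PySem.Dict String (List (String × Option String))}
    {u : Option String} {W : List String} (h : pvRoot d u W) :
    ∀ x ∈ W, ∃ pre suf, W = pre ++ x :: suf ∧ pvRoot d (some x) (x :: suf) := by
  intro x hx
  obtain ⟨pre, suf, he⟩ := List.append_of_mem hx
  exact ⟨pre, suf, he, pvRoot_suffix h pre x suf he⟩

-- the accumulated chain (parent-linked, ending at m) is disjoint from m's rooted walk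
theorem pvDisj {d : PySem.Dict String (List (String × Option String))}
    {m : String} {W : List String}
    (hW : pvRoot d (some m) W) (hne : W ≠ []) :
    ∀ cs, pvLinks d cs (some m) → m ∉ cs → ∀ c ∈ cs, c ∉ W := by
  -- W = m :: restW
  obtain ⟨infom, hm⟩ : ∃ info, pvLook d m = some info := by
    cases hW with
    | stopInvalid _ _ => exact absurd rfl hne
    | step _ info _ h _ _ => exact ⟨info, h⟩
  obtain ⟨restW, hWe, _, _⟩ := pvRoot_cons_of_some hW hm
  have hndW : W.Nodup := pvRoot_nodup hW
  have hmW : m ∉ restW := by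
    rw [hWe] at hndW
    exact (List.nodup_cons.mp hndW).1
  -- inner: from a chain member in W, following the links lands m in restW
  have inner : ∀ cs, pvLinks d cs (some m) → m ∉ cs →
      ∀ c, cs.head? = some c → c ∈ W → m ∈ restW := by
    intro cs
    induction cs with
    | nil => intro _ _ c hh; cases hh
    | cons c0 rest ih =>
      intro hlk hm0 c hh hcW
      cases hh
      obtain ⟨⟨info0, hl0, hp0⟩, hrest⟩ := hlk
      obtain ⟨pre, suf, hsplit, hroot⟩ := pvRoot_mem_suffix hW c0 hcW
      obtain ⟨ids, hids, hrid, _⟩ := pvRoot_cons_of_some hroot hl0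
      simp only [List.cons.injEq] at hids
      obtain ⟨_, rfl⟩ := hids
      have hc0m : c0 ≠ m := fun he => hm0 (he ▸ List.mem_cons_self)
      have hpre : ∃ pre', pre = m :: pre' := by
        cases pre with
        | nil =>
          exfalso
          rw [hWe] at hsplit
          simp only [List.nil_append, List.cons.injEq] at hsplit
          exact hc0m hsplit.1.symm
        | cons q pre' =>
          rw [hWe] at hsplit
          simp only [List.cons_append, List.cons.injEq] at hsplit
          exact ⟨pre', by rw [hsplit.1]⟩
      obtain ⟨pre', rfl⟩ := hpre
      have hrest_eq : restW = pre' ++ c0 :: suf := by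
        rw [hWe] at hsplit
        simpa using hsplit
      cases rest with
      | nil =>
        -- parent of c0 is m itself
        simp only at hp0
        rw [hp0] at hrid
        obtain ⟨ids2, hids2, _, _⟩ := pvRoot_cons_of_some hrid hm
        have hmsuf : m ∈ suf := by rw [hids2]; exact List.mem_cons_self
        rw [hrest_eq]
        simp [hmsuf]
      | cons c1 rest' =>
        simp only at hp0
        rw [hp0] at hrid
        obtain ⟨⟨info1, hl1, hp1⟩, hrest'⟩ := hrest
        obtain ⟨ids2, hids2, _, _⟩ := pvRoot_cons_of_some hrid hl1
        have hc1W : c1 ∈ W := by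
          rw [hsplit]
          have : c1 ∈ suf := by rw [hids2]; exact List.mem_cons_self
          simp [this]
        exact ih ⟨⟨info1, hl1, hp1⟩, hrest'⟩ (fun hmm => hm0 (List.mem_cons_of_mem _ hmm)) c1 rfl hc1W
  intro cs hlk hm0 c hc hcW
  obtain ⟨pre, suf, rfl⟩ := List.append_of_mem hc
  have hlk2 : pvLinks d (c :: suf) (some m) := pvLinks_suffix hlk
  have hm2 : m ∉ c :: suf := fun hmm => hm0 (by simp [List.mem_append, hmm])
  exact hmW (inner (c :: suf) hlk2 hm2 c rfl hcW)

-- invariant: every cached path is the standalone rooted path of its id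
def pvInv (d : PySem.Dict String (List (String × Option String)))
    (memo : PySem.Dict String String) : Prop :=
  ∀ x b, memo.get? x = some b →
    ∃ W, pvRoot d (some x) W ∧ W ≠ [] ∧
      b = PySem.Str.join "/" ((W.map (pvTitleOf d)).reverse)

theorem pvInv_empty (d : PySem.Dict String (List (String × Option String))) :
    pvInv d PySem.Dict.empty := by
  intro x b h
  rw [PySem.Dict.get?_empty] at h
  cases h

-- path-building step of B's back-fill loop
def pvStep2 (a : Option String) (t : String) : Option String :=
  some (match a with | none => t | some s => s ++ "/" ++ t)

theorem pvCharsJoin_glue (sep a c : List Char) (rest : List (List Char)) :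
    PySem.Chars.join sep ((a ++ sep ++ c) :: rest) = PySem.Chars.join sep (a :: c :: rest) := by
  cases rest with
  | nil => simp [PySem.Chars.join_singleton, PySem.Chars.join_cons_cons]
  | cons u us => simp [PySem.Chars.join_cons_cons, List.append_assoc]

theorem pvCharsJoin_snoc (sep t : List Char) :
    ∀ (L : List (List Char)), L ≠ [] →
      PySem.Chars.join sep (L ++ [t]) = PySem.Chars.join sep L ++ sep ++ t := by
  intro L
  induction L with
  | nil => intro h; exact absurd rfl h
  | cons a L ih =>
    intro _
    cases L with
    | nil => simp [PySem.Chars.join_singleton, PySem.Chars.join_cons_cons]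
    | cons b L2 =>
      have ihh := ih (by simp)
      simp only [List.cons_append] at ihh ⊢
      rw [PySem.Chars.join_cons_cons, ihh, PySem.Chars.join_cons_cons]
      simp [List.append_assoc]

theorem pvStrJoin_singleton (t : String) : PySem.Str.join "/" [t] = t := by
  rw [← String.toList_inj]
  simp [PySem.Str.toList_join, PySem.Chars.join_singleton]

theorem pvStrJoin_glue (a c : String) (rest : List String) :
    PySem.Str.join "/" ((a ++ "/" ++ c) :: rest) = PySem.Str.join "/" (a :: c :: rest) := by
  rw [← String.toList_inj]
  simp only [PySem.Str.toList_join, List.map_cons, String.toList_append]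
  exact pvCharsJoin_glue _ _ _ _

theorem pvStrJoin_snoc (L : List String) (hL : L ≠ []) (t : String) :
    PySem.Str.join "/" (L ++ [t]) = PySem.Str.join "/" L ++ "/" ++ t := by
  rw [← String.toList_inj]
  simp only [PySem.Str.toList_join, List.map_append, List.map_cons, List.map_nil,
    String.toList_append]
  exact pvCharsJoin_snoc _ _ _ (by simpa using hL)

theorem pvFoldPath_some : ∀ (ts : List String) (b : String),
    ts.foldl pvStep2 (some b) = some (PySem.Str.join "/" (b :: ts)) := by
  intro ts
  induction ts with
  | nil => intro b; simp [pvStrJoin_singleton]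
  | cons t ts ih =>
    intro b
    simp only [List.foldl_cons, pvStep2]
    rw [ih, pvStrJoin_glue]

theorem pvFoldPath_none (ts : List String) :
    ts.foldl pvStep2 none
      = match ts with | [] => none | _ => some (PySem.Str.join "/" ts) := by
  cases ts with
  | nil => rfl
  | cons t ts =>
    simp only [List.foldl_cons, pvStep2]
    exact pvFoldPath_some ts t

-- ============ the main chain-walk lemma ============
theorem pvMW {d : PySem.Dict String (List (String × Option String))}
    {memo : PySem.Dict String String} (hInv : pvInv d memo) :
    ∀ (fuel : Nat) (curr : Option String) (acc : List (String × String))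
      (seen : PySem.Set String) (ch : List (String × String)) (bs : Option String) (cyc : Bool),
      pvChainWalk d memo fuel curr acc seen = (ch, bs, cyc) →
      (∀ x : String, x ∈ seen ↔ x ∈ acc.map Prod.fst) →
      pvLinks d (acc.map Prod.fst) curr →
      (acc.map Prod.fst).Nodup →
      fuel + acc.length = d.size + 2 →
      ∃ suffix tail,
        ch = acc ++ suffix ∧
        (∀ ct ∈ suffix, pvLook d ct.1 ≠ none ∧ pvTitleOf d ct.1 = ct.2) ∧
        (∀ x ∈ suffix.map Prod.fst, x ∉ seen) ∧
        (cyc = true →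
          bs = none ∧ pvWalkA d fuel curr seen = suffix.map Prod.snd ∧ ch ≠ []) ∧
        (cyc = false →
          pvRoot d curr (suffix.map Prod.fst ++ tail) ∧
          (∀ x ∈ tail, x ∉ seen) ∧
          pvWalkA d fuel curr seen = suffix.map Prod.snd ++ tail.map (pvTitleOf d) ∧
          (bs = none → tail = []) ∧
          (∀ b, bs = some b → ∃ mm rest, tail = mm :: rest ∧ memo.get? mm = some b)) := by
  intro fuel
  induction fuel with
  | zero =>
    intro curr acc seen ch bs cyc heq hseen hlinks hnd hfuel
    exfalso
    have hle : (acc.map Prod.fst).length ≤ d.size :=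
      pvLen_le_size hnd (pvLinks_mem_keys hlinks)
    simp only [List.length_map] at hle
    omega
  | succ n ih =>
    intro curr acc seen ch bs cyc heq hseen hlinks hnd hfuel
    cases curr with
    | none =>
      simp only [pvChainWalk, Prod.mk.injEq] at heq
      obtain ⟨rfl, rfl, rfl⟩ := heq
      refine ⟨[], [], by simp, by simp, by simp, by simp, fun _ => ?_⟩
      refine ⟨pvRoot.stopNone, by simp, by simp [pvWalkA], fun _ => rfl, ?_⟩
      rintro b ⟨⟩
    | some c =>
      by_cases h1 : c = ""
      · subst h1
        simp only [pvChainWalk, if_pos rfl, Prod.mk.injEq] at heq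
        obtain ⟨rfl, rfl, rfl⟩ := heq
        refine ⟨[], [], by simp, by simp, by simp, by simp, fun _ => ?_⟩
        refine ⟨pvRoot.stopInvalid _ (pvLook_eq_none_iff.mpr (Or.inl rfl)),
          by simp, by simp [pvWalkA], fun _ => rfl, ?_⟩
        rintro b ⟨⟩
      by_cases hs : c ∈ seen
      · simp only [pvChainWalk, if_neg h1, PySem.Set.contains_eq_listContains] at heq
        rw [if_pos (by simpa using hs)] at heq
        simp only [Prod.mk.injEq] at heq
        obtain ⟨rfl, rfl, rfl⟩ := heq
        refine ⟨[], [], by simp, by simp, by simp, fun _ => ?_, by rintro ⟨⟩⟩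
        refine ⟨rfl, by simp [pvWalkA, h1, hs], ?_⟩
        have hmem : c ∈ acc.map Prod.fst := (hseen c).mp hs
        intro hacc
        rw [hacc] at hmem
        simp at hmem
      cases hm : memo.get? c with
      | some b0 =>
        simp only [pvChainWalk, if_neg h1, PySem.Set.contains_eq_listContains] at heq
        rw [if_neg (by simpa using hs), hm] at heq
        simp only [Prod.mk.injEq] at heq
        obtain ⟨rfl, rfl, rfl⟩ := heq
        obtain ⟨W, hWroot, hWne, hbeq⟩ := hInv c b0 hm
        have hcacc : c ∉ acc.map Prod.fst := fun hmem => hs ((hseen c).mpr hmem)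
        have hdisjW : ∀ y ∈ acc.map Prod.fst, y ∉ W :=
          pvDisj hWroot hWne (acc.map Prod.fst) hlinks hcacc
        have htailfresh : ∀ x ∈ W, x ∉ seen := by
          intro x hx hxs
          exact hdisjW x ((hseen x).mp hxs) hx
        have hWn : W.length < n + 1 := by
          have hnodup : (acc.map Prod.fst ++ W).Nodup := by
            rw [List.nodup_append]
            exact ⟨hnd, pvRoot_nodup hWroot, fun a ha b hb he => hdisjW a ha (he ▸ hb)⟩
          have hsub : ∀ x ∈ acc.map Prod.fst ++ W, x ∈ d.keys := by
            intro x hx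
            rcases List.mem_append.mp hx with hx | hx
            · exact pvLinks_mem_keys hlinks x hx
            · exact pvRoot_mem_keys hWroot x hx
          have := pvLen_le_size hnodup hsub
          simp only [List.length_append, List.length_map] at this
          omega
        refine ⟨[], W, by simp, by simp, by simp, by rintro ⟨⟩, fun _ => ?_⟩
        refine ⟨by simpa using hWroot, htailfresh,
          by simpa using pvWalkA_of_root hWroot (n + 1) seen htailfresh hWn,
          by rintro ⟨⟩, ?_⟩
        rintro b hb
        cases hb
        cases hWroot with
        | stopInvalid _ _ => exact absurd rfl hWne
        | step _ info ids hlk hrr hnn => exact ⟨c, ids, rfl, hm⟩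
      | none =>
        cases hg : d.get? c with
        | none =>
          simp only [pvChainWalk, if_neg h1, PySem.Set.contains_eq_listContains] at heq
          rw [if_neg (by simpa using hs)] at heq
          simp only [hm, hg, Prod.mk.injEq] at heq
          obtain ⟨rfl, rfl, rfl⟩ := heq
          refine ⟨[], [], by simp, by simp, by simp, by rintro ⟨⟩, fun _ => ?_⟩
          refine ⟨pvRoot.stopInvalid _ (pvLook_eq_none_iff.mpr (Or.inr (Or.inl hg))),
            by simp, by simp [pvWalkA, h1, hs, hg], fun _ => rfl, ?_⟩
          rintro b ⟨⟩
        | some info =>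
          by_cases h2 : info = []
          · subst h2
            simp only [pvChainWalk, if_neg h1, PySem.Set.contains_eq_listContains] at heq
            rw [if_neg (by simpa using hs)] at heq
            simp only [hm, hg, Prod.mk.injEq] at heq
            obtain ⟨rfl, rfl, rfl⟩ := heq
            refine ⟨[], [], by simp, by simp, by simp, by rintro ⟨⟩, fun _ => ?_⟩
            refine ⟨pvRoot.stopInvalid _ (pvLook_eq_none_iff.mpr (Or.inr (Or.inr hg))),
              by simp, by simp [pvWalkA, h1, hs, hg], fun _ => rfl, ?_⟩
            rintro b ⟨⟩
          · have hlook : pvLook d c = some info := pvLook_eq_some_iff.mpr ⟨h1, hg, h2⟩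
            have hstep : pvChainWalk d memo (n + 1) (some c) acc seen
                = pvChainWalk d memo n (pvInfoParent info)
                    (acc ++ [(c, pvInfoTitle info)]) (PySem.Set.add seen c) := by
              simp only [pvChainWalk, if_neg h1, PySem.Set.contains_eq_listContains]
              rw [if_neg (by simpa using hs)]
              simp only [hm, hg, if_neg h2]
            rw [hstep] at heq
            have hseen' : ∀ x : String, x ∈ PySem.Set.add seen c ↔
                x ∈ (acc ++ [(c, pvInfoTitle info)]).map Prod.fst := by
              intro x
              rw [PySem.Set.mem_add]
              simp [hseen x]
            have hlinks' : pvLinks d ((acc ++ [(c, pvInfoTitle info)]).map Prod.fst)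
                (pvInfoParent info) := by
              simpa using pvLinks_snoc hlook hlinks
            have hcacc : c ∉ acc.map Prod.fst := fun hmem => hs ((hseen c).mpr hmem)
            have hnd' : ((acc ++ [(c, pvInfoTitle info)]).map Prod.fst).Nodup := by
              simp only [List.map_append, List.map_cons, List.map_nil]
              rw [List.nodup_append]
              refine ⟨hnd, List.nodup_singleton _, ?_⟩
              intro a ha b hb
              simp only [List.mem_singleton] at hb
              subst hb
              exact fun he => hcacc (he ▸ ha)
            have hfuel' : n + (acc ++ [(c, pvInfoTitle info)]).length = d.size + 2 := by
              simp only [List.length_append, List.length_cons, List.length_nil]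
              omega
            obtain ⟨sfx, tail, hch, htit, hfresh, hcycT, hcycF⟩ :=
              ih (pvInfoParent info) (acc ++ [(c, pvInfoTitle info)])
                (PySem.Set.add seen c) ch bs cyc heq hseen' hlinks' hnd' hfuel'
            have hwstep : pvWalkA d (n + 1) (some c) seen
                = pvInfoTitle info :: pvWalkA d n (pvInfoParent info) (PySem.Set.add seen c) := by
              simp [pvWalkA, h1, hs, hg, h2]
            have hfresh' : ∀ x ∈ sfx.map Prod.fst, x ∉ seen ∧ x ≠ c := by
              intro x hx
              have h3 := hfresh x hx
              constructor
              · intro hxs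
                exact h3 ((PySem.Set.mem_add seen c x).mpr (Or.inl hxs))
              · intro hxc
                exact h3 ((PySem.Set.mem_add seen c x).mpr (Or.inr hxc))
            refine ⟨(c, pvInfoTitle info) :: sfx, tail, by simpa using hch, ?_, ?_, ?_, ?_⟩
            · intro ct hct
              rcases List.mem_cons.mp hct with rfl | hct
              · exact ⟨by rw [hlook]; simp, by unfold pvTitleOf; rw [hlook]⟩
              · exact htit ct hct
            · intro x hx
              rcases List.mem_cons.mp (by simpa using hx : x ∈ c :: sfx.map Prod.fst) with rfl | hx
              · exact hs
              · exact (hfresh' x hx).1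
            · intro hc
              obtain ⟨hbs, hwalk, hchne⟩ := hcycT hc
              exact ⟨hbs, by rw [hwstep, hwalk]; simp, hchne⟩
            · intro hc
              obtain ⟨hroot, htailf, hwalk, hbn, hbs⟩ := hcycF hc
              have htailf' : ∀ x ∈ tail, x ∉ seen ∧ x ≠ c := by
                intro x hx
                have h3 := htailf x hx
                constructor
                · intro hxs
                  exact h3 ((PySem.Set.mem_add seen c x).mpr (Or.inl hxs))
                · intro hxc
                  exact h3 ((PySem.Set.mem_add seen c x).mpr (Or.inr hxc))
              refine ⟨?_, fun x hx => (htailf' x hx).1,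
                by rw [hwstep, hwalk]; simp, hbn, hbs⟩
              have hnotin : c ∉ sfx.map Prod.fst ++ tail := by
                intro hc2
                rcases List.mem_append.mp hc2 with hc2 | hc2
                · exact (hfresh' c hc2).2 rfl
                · exact (htailf' c hc2).2 rfl
              simpa using pvRoot.step c info (sfx.map Prod.fst ++ tail) hlook hroot hnotin

-- ============ the fold over the reversed chain ============
def pvBasePath (d : PySem.Dict String (List (String × Option String)))
    (W : List String) : Option String :=
  match W with
  | [] => none
  | _ => some (PySem.Str.join "/" ((W.map (pvTitleOf d)).reverse))

theorem pvBasePath_cons (d : PySem.Dict String (List (String × Option String)))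
    (c : String) (W : List String) :
    pvBasePath d (c :: W)
      = some (match pvBasePath d W with
          | none => pvTitleOf d c
          | some s => s ++ "/" ++ pvTitleOf d c) := by
  cases W with
  | nil => simp [pvBasePath, pvStrJoin_singleton]
  | cons w ws =>
    simp only [pvBasePath]
    have h0 : (((c :: w :: ws).map (pvTitleOf d)).reverse)
        = ((w :: ws).map (pvTitleOf d)).reverse ++ [pvTitleOf d c] := by simp
    have hne : (((w :: ws).map (pvTitleOf d))).reverse ≠ [] := by simp
    rw [h0, pvStrJoin_snoc _ hne]

theorem pvFoldMemo {d : PySem.Dict String (List (String × Option String))} :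
    ∀ (rev : List (String × String)) (W : List String) (memo : PySem.Dict String String),
      pvInv d memo →
      (∀ pre c t suf, rev = pre ++ (c, t) :: suf →
        pvRoot d (some c) (c :: (pre.map Prod.fst).reverse ++ W) ∧ pvTitleOf d c = t) →
      pvInv d ((rev.foldl
        (fun (st : Option String × PySem.Dict String String) (ct : String × String) =>
          (some (match st.1 with | none => ct.2 | some s => s ++ "/" ++ ct.2),
           st.2.insert ct.1 (match st.1 with | none => ct.2 | some s => s ++ "/" ++ ct.2)))
        (pvBasePath d W, memo)).2) ∧
      (rev.foldl
        (fun (st : Option String × PySem.Dict String String) (ct : String × String) =>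
          (some (match st.1 with | none => ct.2 | some s => s ++ "/" ++ ct.2),
           st.2.insert ct.1 (match st.1 with | none => ct.2 | some s => s ++ "/" ++ ct.2)))
        (pvBasePath d W, memo)).1
        = pvBasePath d ((rev.map Prod.fst).reverse ++ W) := by
  intro rev
  induction rev with
  | nil =>
    intro W memo hInv _
    exact ⟨hInv, by simp⟩
  | cons ct rev' ih =>
    intro W memo hInv H
    obtain ⟨c, t⟩ := ct
    obtain ⟨hrootc, htc⟩ := H [] c t rev' rfl
    simp only [List.nil_append, List.map_nil, List.reverse_nil] at hrootc
    have hp : (some (match pvBasePath d W with | none => t | some s => s ++ "/" ++ t) : Option String)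
        = pvBasePath d (c :: W) := by
      rw [pvBasePath_cons d c W, htc]
    have hpj : (match pvBasePath d W with | none => t | some s => s ++ "/" ++ t)
        = PySem.Str.join "/" (((c :: W).map (pvTitleOf d)).reverse) := by
      have h6 := hp
      simp only [pvBasePath] at h6
      exact Option.some_injective _ h6
    have hInv' : pvInv d (memo.insert c
        (match pvBasePath d W with | none => t | some s => s ++ "/" ++ t)) := by
      intro x b hx
      rw [PySem.Dict.get?_insert] at hx
      by_cases hxc : x = c
      · rw [if_pos hxc] at hx
        cases hxc
        refine ⟨c :: W, hrootc, by simp, ?_⟩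
        rw [← Option.some_injective _ hx, hpj]
      · rw [if_neg hxc] at hx
        exact hInv x b hx
    have H' : ∀ pre c' t' suf, rev' = pre ++ (c', t') :: suf →
        pvRoot d (some c') (c' :: (pre.map Prod.fst).reverse ++ (c :: W)) ∧
          pvTitleOf d c' = t' := by
      intro pre c' t' suf he
      have h3 := H ((c, t) :: pre) c' t' suf (by rw [he]; rfl)
      simpa [List.append_assoc] using h3
    have hmain := ih (c :: W)
      (memo.insert c (match pvBasePath d W with | none => t | some s => s ++ "/" ++ t))
      hInv' H'
    simp only [List.foldl_cons]
    rw [hp]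
    refine ⟨hmain.1, ?_⟩
    rw [hmain.2]
    simp [List.append_assoc]

theorem pvFoldCyc : ∀ (rev : List (String × String)) (b : Option String)
    (m : PySem.Dict String String),
    rev.foldl (fun (st : Option String × PySem.Dict String String) (ct : String × String) =>
      (some (match st.1 with | none => ct.2 | some s => s ++ "/" ++ ct.2), st.2)) (b, m)
    = ((rev.map Prod.snd).foldl pvStep2 b, m) := by
  intro rev
  induction rev with
  | nil => intro b m; rfl
  | cons ct rev' ih =>
    intro b m
    simp only [List.foldl_cons, List.map_cons]
    exact ih _ _

theorem pvResolve {d : PySem.Dict String (List (String × Option String))}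
    {memo : PySem.Dict String String} (hInv : pvInv d memo) (nb : String) :
    (pvMemoPath nb d memo).1 = pvComputePathA nb d ∧
    pvInv d (pvMemoPath nb d memo).2 := by
  unfold pvMemoPath
  obtain ⟨sfx, tail, hch, htit, hfresh, hcycT, hcycF⟩ :=
    pvMW hInv (d.size + 2) (some nb) [] (PySem.Set.ofList [])
      (pvChainWalk d memo (d.size + 2) (some nb) [] (PySem.Set.ofList [])).1
      (pvChainWalk d memo (d.size + 2) (some nb) [] (PySem.Set.ofList [])).2.1
      (pvChainWalk d memo (d.size + 2) (some nb) [] (PySem.Set.ofList [])).2.2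
      (by simp) (by simp) trivial (by simp) (by simp)
  simp only [List.nil_append] at hch
  cases hcyc : (pvChainWalk d memo (d.size + 2) (some nb) [] (PySem.Set.ofList [])).2.2 with
  | true =>
    obtain ⟨hb, hwalk, hchne⟩ := hcycT hcyc
    have hnb : nb ≠ "" := by
      intro hnb
      subst hnb
      have hR : pvChainWalk d memo (d.size + 2) (some "") [] (PySem.Set.ofList [])
          = ([], none, false) := by
        have h2 : d.size + 2 = (d.size + 1) + 1 := rfl
        rw [h2]
        simp [pvChainWalk]
      rw [hR] at hcyc
      cases hcyc
    have hsfxne : sfx ≠ [] := by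
      intro h0
      rw [h0] at hch
      exact hchne hch
    constructor
    · simp only [hch, hb, hcyc, eq_self_iff_true, if_true]
      rw [pvFoldCyc sfx.reverse none memo]
      dsimp only
      rw [pvFoldPath_none]
      unfold pvComputePathA
      rw [if_neg hnb, hwalk]
      dsimp only
      have h2 : sfx.map Prod.snd ≠ [] := by simp [hsfxne]
      rw [if_neg h2]
      have h1 : sfx.reverse.map Prod.snd = (sfx.map Prod.snd).reverse := by simp
      rw [h1]
      cases h3 : (sfx.map Prod.snd).reverse with
      | nil =>
        exfalso
        rw [List.reverse_eq_nil_iff] at h3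
        exact h2 h3
      | cons a l => rfl
    · simp only [hch, hb, hcyc, eq_self_iff_true, if_true]
      rw [pvFoldCyc sfx.reverse none memo]
      exact hInv
  | false =>
    obtain ⟨hroot, htailf, hwalk, hbn, hbs⟩ := hcycF hcyc
    simp only [hch, hcyc, Bool.false_eq_true, if_false]
    by_cases hnb : nb = ""
    · subst hnb
      have h0 : pvRoot d (some "") [] :=
        pvRoot.stopInvalid _ (pvLook_eq_none_iff.mpr (Or.inl rfl))
      have h1 : sfx.map Prod.fst ++ tail = [] := pvRoot_det hroot h0
      obtain ⟨h2, h3⟩ := List.append_eq_nil_iff.mp h1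
      have hsfx : sfx = [] := by simpa using h2
      have hbnone : (pvChainWalk d memo (d.size + 2) (some "") [] (PySem.Set.ofList [])).2.1
          = none := by
        cases hb2 : (pvChainWalk d memo (d.size + 2) (some "") [] (PySem.Set.ofList [])).2.1 with
        | none => rfl
        | some b =>
          obtain ⟨mm, rest, htl, _⟩ := hbs b hb2
          rw [h3] at htl
          cases htl
      rw [hsfx, hbnone]
      exact ⟨by simp [pvComputePathA], hInv⟩
    · -- the cached base equals the basePath of the rooted tail
      have hbase : (pvChainWalk d memo (d.size + 2) (some nb) [] (PySem.Set.ofList [])).2.1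
          = pvBasePath d tail := by
        cases hb2 : (pvChainWalk d memo (d.size + 2) (some nb) [] (PySem.Set.ofList [])).2.1 with
        | none => rw [hbn hb2]; rfl
        | some b =>
          obtain ⟨mm, rest, htl, hmm⟩ := hbs b hb2
          obtain ⟨W', hW'root, hW'ne, hbeq⟩ := hInv mm b hmm
          have hmmroot : pvRoot d (some mm) tail := by
            rw [htl]
            exact pvRoot_suffix hroot (sfx.map Prod.fst) mm rest (by rw [htl])
          have hWt : W' = tail := pvRoot_det hW'root hmmroot
          rw [htl]
          simp only [pvBasePath]
          rw [hbeq, hWt, htl]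
      have hsnd : sfx.map Prod.snd = (sfx.map Prod.fst).map (pvTitleOf d) := by
        rw [List.map_map]
        exact (List.map_congr_left (fun ct hct => (htit ct hct).2)).symm
      have hA : pvComputePathA nb d = pvBasePath d (sfx.map Prod.fst ++ tail) := by
        unfold pvComputePathA
        rw [if_neg hnb, hwalk, hsnd, ← List.map_append]
        cases h0 : sfx.map Prod.fst ++ tail with
        | nil => simp [pvBasePath]
        | cons a l => simp [pvBasePath]
      have H : ∀ pre c t suf, sfx.reverse = pre ++ (c, t) :: suf →
          pvRoot d (some c) (c :: (pre.map Prod.fst).reverse ++ tail) ∧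
            pvTitleOf d c = t := by
        intro pre c t suf he
        have hsfx : sfx = suf.reverse ++ (c, t) :: pre.reverse := by
          have h4 := congrArg List.reverse he
          simpa [List.append_assoc] using h4
        have hmem : (c, t) ∈ sfx := by
          rw [hsfx]
          simp
        refine ⟨?_, (htit (c, t) hmem).2⟩
        have h5 := pvRoot_suffix hroot ((suf.reverse).map Prod.fst) c
          ((pre.reverse).map Prod.fst ++ tail)
          (by rw [hsfx]; simp [List.append_assoc])
        simpa [List.append_assoc, List.map_reverse] using h5
      have hmain := pvFoldMemo sfx.reverse tail memo hInv H
      rw [hbase]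
      refine ⟨?_, hmain.1⟩
      rw [hmain.2, hA]
      simp [List.map_reverse]

theorem pvTopFold {d : PySem.Dict String (List (String × Option String))} (sl : String) :
    ∀ (items : List (String × List (String × Option String)))
      (acc : List (Bool × Int × String)) (memo : PySem.Dict String String),
      pvInv d memo →
      (items.foldl (fun (st : List (Bool × Int × String) × PySem.Dict String String) p =>
        let title := pvRawTitle p.2
        if PySem.Str.isIn sl (PySem.Str.lower title) then
          let r := pvMemoPath p.1 d st.2
          match r.1 with
          | some fp =>
            if fp ≠ "" then
              (st.1 ++ [(!(PySem.Str.lower title == sl), PySem.Str.len fp, fp)], r.2)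
            else (st.1, r.2)
          | none => (st.1, r.2)
        else st) (acc, memo)).1
      = items.foldl (fun (acc : List (Bool × Int × String)) p =>
          let title := pvRawTitle p.2
          if PySem.Str.isIn sl (PySem.Str.lower title) then
            match pvComputePathA p.1 d with
            | some fp =>
              if fp ≠ "" then
                acc ++ [(!(PySem.Str.lower title == sl), PySem.Str.len fp, fp)]
              else acc
            | none => acc
          else acc) acc := by
  intro items
  induction items with
  | nil => intro acc memo _; rfl
  | cons p rest ih =>
    intro acc memo hInv
    obtain ⟨hres, hinv'⟩ := pvResolve hInv p.1
    simp only [List.foldl_cons]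
    cases hin : PySem.Str.isIn sl (PySem.Str.lower (pvRawTitle p.2)) with
    | false =>
      simp only [hin, Bool.false_eq_true, if_false]
      exact ih _ _ hInv
    | true =>
      simp only [hin, if_true]
      rw [hres]
      cases hp : pvComputePathA p.1 d with
      | none =>
        simp only [hp]
        exact ih _ _ hinv'
      | some fp =>
        simp only [hp]
        by_cases hfp : fp = ""
        · simp only [hfp, ne_eq, not_true_eq_false, if_false]
          exact ih _ _ hinv'
        · simp only [ne_eq, hfp, not_false_eq_true, if_true]
          exact ih _ _ hinv'

theorem pvMain (search_term : String) (notebooks_map : List (String × List (String × Option String))) (limit : Int) :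
    find_notebook_suggestions_py search_term notebooks_map limit
      = find_notebook_suggestions_py_alt search_term notebooks_map limit := by
  unfold find_notebook_suggestions_py find_notebook_suggestions_py_alt
  have h := pvTopFold (d := PySem.Dict.ofList notebooks_map) (PySem.Str.lower search_term)
    (PySem.Dict.ofList notebooks_map).items [] PySem.Dict.empty
    (pvInv_empty _)
  simp only at h ⊢
  rw [h]

-- ===== VERDICT (by name: the statement is the Claim_ definition above) =====
theorem find_notebook_suggestions_py_spec : Claim_equal_find_notebook_suggestions_py := by
  intro search_term notebooks_map limit _ _
  exact pvMain search_term notebooks_map limit
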